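-- pv_equiv track=rewrite | github.com/artursuskevits/palgatoo | MinuMoodul.py | maksimum
-- ===== SOURCE A (Python) =====
-- def maksimum(i:list,p:list):
--     """Found max Palg
--     ::param: List i: Inimeste jдrjend
--     ::param: List p: Palgade jдrjend
--     :rtype: int, str
--     """
--
--     palk = max(p)
--     n = p.count(palk)
--     nimi = []
--     if palk in p:
--         for jj in range(n):
--             ind = p.index(palk)
--             nimi.append(i[ind])
--             p[ind] = -1
--
--     return palk, nimi
-- ===== SOURCE B (Python) =====
-- def maksimum(i: list, p: list):
--     """One left-to-right pass keeping the running maximum and the indices that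
--     attain it; then read the names and write -1 at each of those positions."""
--     if not p:
--         raise ValueError("max() arg is an empty sequence")
--     best = p[0]
--     leaders = [0]
--     for j in range(1, len(p)):
--         v = p[j]
--         if v > best:
--             best = v
--             leaders = [j]
--         elif v == best:
--             leaders.append(j)
--     nimi = []
--     for idx in leaders:
--         nimi.append(i[idx])
--         p[idx] = -1
--     return best, nimi
-- ===== Notes on version B (the rewrite author's own statement) =====
-- stated objective: alternative
-- what changed: Replaces max()+count()+repeated p.index() scans with mutation with a single left-to-right pass that maintains the running maximum and the list of indices attaining it, then reads the names (and writes the same -1s) from that index list.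
-- intended difference: When the maximum of p is -1 and occurs at several positions whose names differ, A's write p[ind]=-1 is a no-op so p.index(-1) keeps returning the first position and A returns that first name repeated count times, while B returns the name at each maximum position; B's is the intended list of the earners of the maximum. — e.g. on maksimum(["a", "b"], [-1, -1]): A returns (-1, ["a", "a"]), B returns (-1, ["a", "b"])
-- outside the precondition, e.g. on maksimum(['a'], [-1, -1]): A returns (-1, ['a', 'a']), B raises IndexError
import Mathlib
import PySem

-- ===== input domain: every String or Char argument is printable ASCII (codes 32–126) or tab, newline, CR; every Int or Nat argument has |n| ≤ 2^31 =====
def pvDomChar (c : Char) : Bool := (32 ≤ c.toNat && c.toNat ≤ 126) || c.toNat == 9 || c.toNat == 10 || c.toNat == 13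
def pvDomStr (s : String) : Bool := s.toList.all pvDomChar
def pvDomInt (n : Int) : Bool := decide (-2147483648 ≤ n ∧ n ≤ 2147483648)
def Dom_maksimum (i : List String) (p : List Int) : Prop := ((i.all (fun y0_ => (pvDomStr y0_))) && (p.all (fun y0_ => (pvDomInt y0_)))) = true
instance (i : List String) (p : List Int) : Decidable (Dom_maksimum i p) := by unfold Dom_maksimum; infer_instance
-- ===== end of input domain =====

-- B replaces A's max()+count()+repeated p.index() passes by ONE left-to-right pass keeping the
-- running maximum and its index list; both Pythons mutate p identically (-1 at the max slots);
-- the theorems below are about the return value.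

-- ===== PORT A =====
-- body of A's 'for jj in range(n)' loop: ind = p.index(palk); nimi.append(i[ind]); p[ind] = -1.
-- 'none' = an exception inside the loop (excluded by Pre_).
def maksA (i : List String) (palk : Int) (st : Option (List Int × List String)) : Option (List Int × List String) :=
  match st with
  | none => none
  | some (q, nimi) =>
    match PySem.List.index? q palk with
    | none => none
    | some ind =>
      match PySem.List.pyGet? i (ind : Int) with
      | none => none
      | some nm => some (q.set ind (-1), nimi ++ [nm])

def maksimum (i : List String) (p : List Int) : Int × List String :=
  match PySem.List.max? p (fun x => x) with
  | none => (0, [])   -- max([]) raises ValueError; excluded by Pre_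
  | some palk =>
    let n := PySem.List.count p palk
    let st :=
      if palk ∈ p then
        (List.range n).foldl (fun acc _ => maksA i palk acc) (some (p, ([] : List String)))
      else some (p, [])
    match st with
    | none => (palk, [])   -- IndexError on i[ind]; excluded by Pre_
    | some (_, nimi) => (palk, nimi)

-- ===== PORT B =====
-- body of B's single pass: v = p[j]; j is always in range, so pyGetD's default is never used
def maksB (p : List Int) (st : Int × List Int) (j : Int) : Int × List Int :=
  let v := PySem.List.pyGetD p j 0
  if st.1 < v then (v, [j])
  else if v = st.1 then (st.1, st.2 ++ [j])
  else st

-- body of B's name loop; 'none' = IndexError on i[idx] (excluded by Pre_)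
def maksBnames (i : List String) (acc : Option (List String)) (idx : Int) : Option (List String) :=
  match acc with
  | none => none
  | some ns =>
    match PySem.List.pyGet? i idx with
    | none => none
    | some nm => some (ns ++ [nm])

def maksimum_alt (i : List String) (p : List Int) : Int × List String :=
  match p with
  | [] => (0, [])   -- B raises ValueError on empty p; excluded by Pre_
  | p0 :: _ =>
    let r := (PySem.List.pyRange 1 (PySem.List.len p)).foldl (maksB p) (p0, ([0] : List Int))
    -- B also writes p[idx] = -1 at each leader; p is never read afterwards, so only the return is tracked
    let nimi := r.2.foldl (maksBnames i) (some [])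
    (r.1, nimi.getD [])

-- ===== PRECONDITION & SPEC =====
-- Pre_ excludes empty p (max([]) raises ValueError) and inputs where some position holding the
-- maximum lies outside i (IndexError in the name lookup; when the maximum is -1, A happens to
-- index only the FIRST such position and can return where B raises, so those are excluded too).
def Pre_maksimum (i : List String) (p : List Int) : Prop :=
  p ≠ [] ∧ ∀ j ∈ List.range p.length,
    p.getD j 0 = (PySem.List.max? p (fun x => x)).getD 0 → j < i.length
instance (i : List String) (p : List Int) : Decidable (Pre_maksimum i p) := by
  unfold Pre_maksimum; infer_instance
def pvWitness_maksimum : List String × List Int := (["a"], [5])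

-- When the maximum of p is -1 and occurs at several positions whose names differ, A's write
-- p[ind] = -1 is a no-op, p.index(-1) keeps returning the first maximum position and A returns
-- that first name count times, while B returns the name at each maximum position — the intended earners.
def D_maksimum (i : List String) (p : List Int) : Prop :=
  p ≠ [] ∧ PySem.List.max? p (fun x => x) = some (-1) ∧
  ∃ j ∈ List.range p.length, p.getD j 0 = -1 ∧
    i.getD j "" ≠ i.getD ((PySem.List.index? p (-1)).getD 0) ""
instance (i : List String) (p : List Int) : Decidable (D_maksimum i p) := by
  unfold D_maksimum; infer_instance

def Spec_maksimum (i : List String) (p : List Int) (out : Int × List String) : Prop :=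
  ¬ D_maksimum i p → out = maksimum_alt i p
instance (i : List String) (p : List Int) (out : Int × List String) : Decidable (Spec_maksimum i p out) := by
  unfold Spec_maksimum; infer_instance

def pvDiffWitness_maksimum : List String × List Int := (["a", "b"], [-1, -1])
def pvDiffWitnessOut_maksimum : (Int × List String) × (Int × List String) :=
  ((-1, ["a", "a"]), (-1, ["a", "b"]))

-- ===== CLAIM (what is proved, stated in full; the proofs are below) =====
def Claim_unchanged_maksimum : Prop := ∀ (i : List String) (p : List Int), Dom_maksimum i p → Pre_maksimum i p → Spec_maksimum i p (maksimum i p)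
def Claim_changed_maksimum : Prop := Dom_maksimum (pvDiffWitness_maksimum.1) (pvDiffWitness_maksimum.2) ∧ Pre_maksimum (pvDiffWitness_maksimum.1) (pvDiffWitness_maksimum.2) ∧ D_maksimum (pvDiffWitness_maksimum.1) (pvDiffWitness_maksimum.2) ∧ maksimum (pvDiffWitness_maksimum.1) (pvDiffWitness_maksimum.2) = pvDiffWitnessOut_maksimum.1 ∧ maksimum_alt (pvDiffWitness_maksimum.1) (pvDiffWitness_maksimum.2) = pvDiffWitnessOut_maksimum.2 ∧ pvDiffWitnessOut_maksimum.1 ≠ pvDiffWitnessOut_maksimum.2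
def Claim_exact_maksimum : Prop := ∀ (i : List String) (p : List Int), Dom_maksimum i p → Pre_maksimum i p → D_maksimum i p → maksimum i p ≠ maksimum_alt i p

-- ===== LEMMAS AND PROOFS =====

-- positions (absolute, starting at offset k) at which the list holds M
def posFrom (M : Int) : List Int → Nat → List Nat
  | [], _ => []
  | x :: t, k => if x = M then k :: posFrom M t (k + 1) else posFrom M t (k + 1)

theorem posFrom_append (M : Int) (l1 l2 : List Int) : ∀ k,
    posFrom M (l1 ++ l2) k = posFrom M l1 k ++ posFrom M l2 (k + l1.length) := by
  induction l1 with
  | nil => intro k; simp [posFrom]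
  | cons x t ih =>
    intro k
    simp only [List.cons_append, posFrom, ih (k + 1), List.length_cons]
    split_ifs <;> simp <;> ring_nf
  
theorem posFrom_nil_of_not_mem {M : Int} {l : List Int} (h : M ∉ l) : ∀ k, posFrom M l k = [] := by
  induction l with
  | nil => intro k; rfl
  | cons x t ih =>
    intro k
    simp only [List.mem_cons, not_or] at h
    simp [posFrom, Ne.symm h.1, ih h.2]

theorem length_posFrom (M : Int) (l : List Int) : ∀ k, (posFrom M l k).length = l.count M := by
  induction l with
  | nil => intro k; rfl
  | cons x t ih =>
    intro k
    by_cases hx : x = M <;> simp [posFrom, hx, ih]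

theorem mem_posFrom {M : Int} {l : List Int} : ∀ {k j}, j ∈ posFrom M l k →
    ∃ m, j = k + m ∧ m < l.length ∧ l.getD m 0 = M := by
  induction l with
  | nil => intro k j h; simp [posFrom] at h
  | cons x t ih =>
    intro k j h
    by_cases hx : x = M
    · simp only [posFrom, if_pos hx, List.mem_cons] at h
      rcases h with h | h
      · exact ⟨0, by omega, by simp, by simpa using hx⟩
      · obtain ⟨m, hm1, hm2, hm3⟩ := ih h
        exact ⟨m + 1, by omega, by simpa using hm2, by simpa using hm3⟩
    · simp only [posFrom, if_neg hx] at h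
      obtain ⟨m, hm1, hm2, hm3⟩ := ih h
      exact ⟨m + 1, by omega, by simpa using hm2, by simpa using hm3⟩

theorem mem_posFrom_of {M : Int} {l : List Int} : ∀ {k m}, m < l.length → l.getD m 0 = M →
    (k + m) ∈ posFrom M l k := by
  induction l with
  | nil => intro k m h; simp at h
  | cons x t ih =>
    intro k m hlt hget
    cases m with
    | zero =>
      rw [List.getD_cons_zero] at hget
      simp [posFrom, hget]
    | succ m =>
      rw [List.getD_cons_succ] at hget
      have hmem := ih (k := k + 1) (m := m) (by simpa using hlt) hget
      have h2 : k + (m + 1) = (k + 1) + m := by omega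
      rw [h2]
      by_cases hx : x = M
      · simp only [posFrom, if_pos hx, List.mem_cons]; exact Or.inr hmem
      · simp only [posFrom, if_neg hx]; exact hmem

theorem foldl_range_iterate {α : Type} (g : α → α) : ∀ (n : Nat) (s : α),
    (List.range n).foldl (fun a _ => g a) s = g^[n] s := by
  intro n
  induction n with
  | zero => intro s; simp
  | succ n ih =>
    intro s
    rw [List.range_succ_eq_map]
    simp [List.foldl_map, ih, Function.iterate_succ_apply]

theorem set_append_cons (pre suf : List Int) (x v : Int) :
    (pre ++ x :: suf).set pre.length v = pre ++ v :: suf := by simp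

theorem loopA_ne (i : List String) (M : Int) (hM : M ≠ -1) : ∀ (n : Nat) (q : List Int) (nimi : List String),
    q.count M = n → (∀ j ∈ posFrom M q 0, j < i.length) →
    ∃ q', (maksA i M)^[n] (some (q, nimi)) =
      some (q', nimi ++ (posFrom M q 0).map (fun j => i.getD j "")) := by
  intro n
  induction n with
  | zero =>
    intro q nimi hc _
    have hnm : M ∉ q := by
      intro h; have := List.count_pos_iff.mpr h; omega
    exact ⟨q, by simp [posFrom_nil_of_not_mem hnm]⟩
  | succ n ih =>
    intro q nimi hc hb
    have hmem : M ∈ q := by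
      apply List.count_pos_iff.mp; omega
    obtain ⟨k, hk⟩ := Option.isSome_iff_exists.mp ((PySem.List.index?_isSome_iff q M).mpr hmem)
    obtain ⟨pre, suf, hq, hlen, hprem⟩ := (PySem.List.index?_eq_some_iff q M k).mp hk
    subst hq
    subst hlen
    have hpos : posFrom M (pre ++ M :: suf) 0 = pre.length :: posFrom M suf (pre.length + 1) := by
      rw [posFrom_append, posFrom_nil_of_not_mem hprem]
      simp [posFrom]
    have hklt : pre.length < i.length := by
      apply hb; rw [hpos]; exact List.mem_cons_self
    have hstep : maksA i M (some (pre ++ M :: suf, nimi)) =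
        some (pre ++ (-1 : Int) :: suf, nimi ++ [i.getD pre.length ""]) := by
      simp only [maksA, hk]
      rw [PySem.List.pyGet?_natCast, List.getElem?_eq_getElem hklt]
      rw [set_append_cons]
      simp [List.getD, List.getElem?_eq_getElem hklt]
    have hc' : (pre ++ (-1 : Int) :: suf).count M = n := by
      have h0 : pre.count M = 0 := List.count_eq_zero.mpr hprem
      simp only [List.count_append, List.count_cons] at hc ⊢
      simp only [h0] at hc ⊢
      have : ¬ ((-1 : Int) == M) = true := by simpa using fun h => hM h.symm
      simp_all
    have hne : (-1 : Int) ≠ M := fun h => hM h.symm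
    have hpos' : posFrom M (pre ++ (-1 : Int) :: suf) 0 = posFrom M suf (pre.length + 1) := by
      rw [posFrom_append, posFrom_nil_of_not_mem hprem]
      simp [posFrom, hne]
    have hb' : ∀ j ∈ posFrom M (pre ++ (-1 : Int) :: suf) 0, j < i.length := by
      intro j hj; apply hb; rw [hpos]; rw [hpos'] at hj; exact List.mem_cons_of_mem _ hj
    obtain ⟨q', hq'⟩ := ih (pre ++ (-1 : Int) :: suf) (nimi ++ [i.getD pre.length ""]) hc' hb'
    refine ⟨q', ?_⟩
    rw [Function.iterate_succ_apply, hstep, hq', hpos, hpos']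
    simp

theorem loopA_neg1 (i : List String) (pre suf : List Int) (hprem : (-1 : Int) ∉ pre)
    (hklt : pre.length < i.length) : ∀ (m : Nat) (nimi : List String),
    (maksA i (-1))^[m] (some (pre ++ (-1 : Int) :: suf, nimi)) =
      some (pre ++ (-1 : Int) :: suf, nimi ++ List.replicate m (i.getD pre.length "")) := by
  intro m
  induction m with
  | zero => intro nimi; simp
  | succ m ih =>
    intro nimi
    have hk : PySem.List.index? (pre ++ (-1 : Int) :: suf) (-1) = some pre.length :=
      (PySem.List.index?_eq_some_iff _ _ _).mpr ⟨pre, suf, rfl, rfl, hprem⟩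
    have hstep : maksA i (-1) (some (pre ++ (-1 : Int) :: suf, nimi)) =
        some (pre ++ (-1 : Int) :: suf, nimi ++ [i.getD pre.length ""]) := by
      simp only [maksA, hk]
      rw [PySem.List.pyGet?_natCast, List.getElem?_eq_getElem hklt]
      rw [set_append_cons]
      simp [List.getD, List.getElem?_eq_getElem hklt]
    rw [Function.iterate_succ_apply, hstep, ih]
    simp [List.replicate_succ]

theorem foldB1 (p : List Int) : ∀ (m : Nat), 1 ≤ m → m ≤ p.length →
    ∃ best, (∀ x ∈ p.take m, x ≤ best) ∧ best ∈ p.take m ∧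
      (PySem.List.pyRange 1 (m : Int)).foldl (maksB p) (p.getD 0 0, ([0] : List Int)) =
        (best, (posFrom best (p.take m) 0).map (Nat.cast : Nat → Int)) := by
  intro m
  induction m with
  | zero => omega
  | succ m ih =>
    intro _ hlen
    by_cases hm0 : m = 0
    · subst hm0
      have hp : 0 < p.length := hlen
      have htake : p.take 1 = [p.getD 0 0] := by
        cases p with
        | nil => simp at hp
        | cons a t => simp
      refine ⟨p.getD 0 0, ?_, ?_, ?_⟩
      · intro x hx; rw [htake] at hx
        simp only [List.mem_singleton] at hx; exact le_of_eq hx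
      · rw [htake]; simp
      · rw [PySem.List.pyRange_one_eq_nil (by norm_num), htake]
        simp [posFrom]
    · have hm1 : 1 ≤ m := by omega
      obtain ⟨best, hle, hmem, hfold⟩ := ih hm1 (by omega)
      have hmlt : m < p.length := by omega
      have htake : p.take (m + 1) = p.take m ++ [p.getD m 0] := by
        rw [List.take_add_one, List.getElem?_eq_getElem hmlt]
        simp [List.getD, List.getElem?_eq_getElem hmlt]
      have hlentake : (p.take m).length = m := by
        simp [List.length_take]; omega
      have hrange : PySem.List.pyRange 1 ((m + 1 : Nat) : Int) =
          PySem.List.pyRange 1 (m : Int) ++ [(m : Int)] := by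
        push_cast
        exact PySem.List.pyRange_one_succ_right (by exact_mod_cast hm1)
      have hv : PySem.List.pyGetD p ((m : Nat) : Int) 0 = p.getD m 0 :=
        PySem.List.pyGetD_natCast p m 0
      rw [hrange, List.foldl_append, hfold]
      simp only [List.foldl_cons, List.foldl_nil]
      rcases lt_trichotomy best (p.getD m 0) with hlt | heq | hgt
      · -- new maximum
        refine ⟨p.getD m 0, ?_, ?_, ?_⟩
        · intro x hx; rw [htake] at hx
          rcases List.mem_append.mp hx with hx | hx
          · exact le_of_lt (lt_of_le_of_lt (hle x hx) hlt)
          · simp only [List.mem_singleton] at hx; omega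
        · rw [htake]; simp
        · have hnm : p.getD m 0 ∉ p.take m := by
            intro h; have := hle _ h; omega
          rw [htake, posFrom_append, posFrom_nil_of_not_mem hnm]
          simp only [maksB, hv, if_pos hlt]
          simp [posFrom, hlentake]
      · -- equal to the maximum
        refine ⟨best, ?_, ?_, ?_⟩
        · intro x hx; rw [htake] at hx
          rcases List.mem_append.mp hx with hx | hx
          · exact hle x hx
          · simp only [List.mem_singleton] at hx; omega
        · rw [htake]; exact List.mem_append.mpr (Or.inl hmem)
        · rw [htake, posFrom_append]
          simp only [maksB, hv, if_neg (by omega : ¬ best < p.getD m 0), if_pos heq.symm]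
          simp [posFrom, heq, hlentake]
      · -- smaller: state unchanged
        refine ⟨best, ?_, ?_, ?_⟩
        · intro x hx; rw [htake] at hx
          rcases List.mem_append.mp hx with hx | hx
          · exact hle x hx
          · simp only [List.mem_singleton] at hx; omega
        · rw [htake]; exact List.mem_append.mpr (Or.inl hmem)
        · rw [htake, posFrom_append]
          simp only [maksB, hv, if_neg (by omega : ¬ best < p.getD m 0),
            if_neg (by omega : ¬ p.getD m 0 = best)]
          have hne : ¬ p[m]?.getD 0 = best := by
            simpa [List.getD] using (by omega : ¬ p.getD m 0 = best)
          simp [posFrom, hne]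

theorem foldB2 (i : List String) : ∀ (ns : List Nat) (acc : List String),
    (∀ j ∈ ns, j < i.length) →
    (ns.map (Nat.cast : Nat → Int)).foldl (maksBnames i) (some acc) =
      some (acc ++ ns.map (fun j => i.getD j "")) := by
  intro ns
  induction ns with
  | nil => intro acc _; simp
  | cons j t ih =>
    intro acc hb
    have hj : j < i.length := hb j List.mem_cons_self
    have hstep : maksBnames i (some acc) ((j : Nat) : Int) = some (acc ++ [i.getD j ""]) := by
      simp only [maksBnames]
      rw [PySem.List.pyGet?_natCast, List.getElem?_eq_getElem hj]
      simp [List.getD, List.getElem?_eq_getElem hj]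
    simp only [List.map_cons, List.foldl_cons, hstep]
    rw [ih (acc ++ [i.getD j ""]) (fun x hx => hb x (List.mem_cons_of_mem _ hx))]
    simp

-- A's loop when the maximum is -1: the write p[ind] = -1 is a no-op and p.index keeps
-- returning the first maximum position, so A repeats that first name count times
theorem maksimumA_neg1 (i : List String) (p : List Int)
    (hmax : PySem.List.max? p (fun x => x) = some (-1))
    (hb : ∀ j ∈ posFrom (-1) p 0, j < i.length) :
    maksimum i p = (-1, List.replicate (PySem.List.count p (-1))
      (i.getD ((PySem.List.index? p (-1)).getD 0) "")) := by
  have hMmem : (-1 : Int) ∈ p := PySem.List.max?_mem hmax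
  unfold maksimum
  rw [hmax]
  simp only [if_pos hMmem]
  rw [foldl_range_iterate (maksA i (-1))]
  obtain ⟨k, hk⟩ := Option.isSome_iff_exists.mp
    ((PySem.List.index?_isSome_iff p (-1)).mpr hMmem)
  obtain ⟨pre, suf, hqe, hlen, hprem⟩ := (PySem.List.index?_eq_some_iff p (-1) k).mp hk
  have hkpos : k ∈ posFrom (-1) p 0 := by
    rw [hqe, posFrom_append, posFrom_nil_of_not_mem hprem]
    simp [posFrom, hlen]
  have hklt : k < i.length := hb k hkpos
  subst hqe
  subst hlen
  rw [hk, loopA_neg1 i pre suf hprem hklt]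
  simp

-- A's loop when the maximum is not -1: each write removes one occurrence, so A collects
-- the name at every maximum position, left to right
theorem maksimumA_ne (i : List String) (p : List Int) (M : Int) (hM : M ≠ -1)
    (hmax : PySem.List.max? p (fun x => x) = some M)
    (hb : ∀ j ∈ posFrom M p 0, j < i.length) :
    maksimum i p = (M, (posFrom M p 0).map (fun j => i.getD j "")) := by
  have hMmem : M ∈ p := PySem.List.max?_mem hmax
  have hcnt : p.count M = PySem.List.count p M := (PySem.List.count_eq p M).symm
  unfold maksimum
  rw [hmax]
  simp only [if_pos hMmem]
  rw [foldl_range_iterate (maksA i M)]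
  obtain ⟨q', hq'⟩ := loopA_ne i M hM (PySem.List.count p M) p [] hcnt hb
  rw [hq']
  simp

-- B returns the maximum and the name at every maximum position, left to right
theorem maksimumB (i : List String) (p : List Int) (M : Int)
    (hmax : PySem.List.max? p (fun x => x) = some M)
    (hb : ∀ j ∈ posFrom M p 0, j < i.length) :
    maksimum_alt i p = (M, (posFrom M p 0).map (fun j => i.getD j "")) := by
  have hMmem : M ∈ p := PySem.List.max?_mem hmax
  cases p with
  | nil => simp at hMmem
  | cons p0 rest =>
    obtain ⟨best, hle, hmemb, hfold⟩ :=
      foldB1 (p0 :: rest) (p0 :: rest).length (by simp) le_rfl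
    rw [List.take_length] at hle hmemb hfold
    have hbest : best = M :=
      le_antisymm (PySem.List.max?_isMax hmax best hmemb) (hle M hMmem)
    subst hbest
    simp only [List.getD_cons_zero] at hfold
    have hred : maksimum_alt i (p0 :: rest) =
        ((List.foldl (maksB (p0 :: rest)) (p0, ([0] : List Int))
            (PySem.List.pyRange 1 (PySem.List.len (p0 :: rest)))).1,
          (List.foldl (maksBnames i) (some [])
            (List.foldl (maksB (p0 :: rest)) (p0, ([0] : List Int))
              (PySem.List.pyRange 1 (PySem.List.len (p0 :: rest)))).2).getD []) := rfl
    rw [hred, PySem.List.len_eq, hfold]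
    dsimp only
    rw [foldB2 i (posFrom best (p0 :: rest) 0) [] hb]
    simp

-- Pre_ gives: every maximum position has a name
theorem bound_of_pre (i : List String) (p : List Int) (M : Int)
    (hmax : PySem.List.max? p (fun x => x) = some M)
    (hbound : ∀ j ∈ List.range p.length,
      p.getD j 0 = (PySem.List.max? p (fun x => x)).getD 0 → j < i.length) :
    ∀ j ∈ posFrom M p 0, j < i.length := by
  intro j hj
  obtain ⟨m0, hj0, hlt, hget⟩ := mem_posFrom hj
  have hj0' : j = m0 := by omega
  subst hj0'
  exact hbound j (List.mem_range.mpr hlt) (by rw [hmax]; simpa using hget)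

-- ===== VERDICT (by name: the statement is the Claim_ definition above) =====
theorem maksimum_spec : Claim_unchanged_maksimum := by
  intro i p _ hpre hnD
  obtain ⟨hp, hbound⟩ := hpre
  obtain ⟨M, hmax⟩ : ∃ M, PySem.List.max? p (fun x => x) = some M := by
    cases h : PySem.List.max? p (fun x => x) with
    | none => exact absurd ((PySem.List.max?_eq_none_iff p _).mp h) hp
    | some M => exact ⟨M, rfl⟩
  have hb := bound_of_pre i p M hmax hbound
  rw [maksimumB i p M hmax hb]
  by_cases hM : M = (-1 : Int)
  · subst hM
    rw [maksimumA_neg1 i p hmax hb]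
    obtain ⟨k, hk⟩ := Option.isSome_iff_exists.mp
      ((PySem.List.index?_isSome_iff p (-1)).mpr (PySem.List.max?_mem hmax))
    have hnames : ∀ j ∈ posFrom (-1) p 0, i.getD j "" = i.getD k "" := by
      intro j hj
      obtain ⟨m0, hj0, hlt, hget⟩ := mem_posFrom hj
      have hj0' : j = m0 := by omega
      subst hj0'
      by_contra hne
      exact hnD ⟨hp, hmax, ⟨j, List.mem_range.mpr hlt, hget, by rw [hk]; simpa using hne⟩⟩
    rw [hk]
    simp only [Option.getD_some, Prod.mk.injEq, true_and]
    symm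
    apply List.eq_replicate_iff.mpr
    constructor
    · rw [List.length_map, length_posFrom, PySem.List.count_eq]
    · intro b hb'
      obtain ⟨j, hj, hbj⟩ := List.mem_map.mp hb'
      rw [← hbj]
      exact hnames j hj
  · rw [maksimumA_ne i p M hM hmax hb]

theorem maksimum_changed : Claim_changed_maksimum := by
  unfold Claim_changed_maksimum; decide

theorem maksimum_tight : Claim_exact_maksimum := by
  intro i p _ hpre hD heq
  obtain ⟨hp, hbound⟩ := hpre
  obtain ⟨_, hmax, j, hjr, hgetj, hne⟩ := hD
  have hb := bound_of_pre i p (-1) hmax hbound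
  rw [maksimumA_neg1 i p hmax hb, maksimumB i p (-1) hmax hb] at heq
  have h2 := congrArg Prod.snd heq
  simp only [] at h2
  have hjpos : j ∈ posFrom (-1) p 0 := by
    have := mem_posFrom_of (M := -1) (l := p) (k := 0) (m := j)
      (List.mem_range.mp hjr) hgetj
    simpa using this
  have hmem : i.getD j "" ∈ (posFrom (-1) p 0).map (fun j => i.getD j "") :=
    List.mem_map.mpr ⟨j, hjpos, rfl⟩
  rw [← h2] at hmem
  exact hne (List.eq_of_mem_replicate hmem)
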